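-- pv_equiv track=rewrite | github.com/songhaeunsong/algorithm_python | 2839/solution.py | countBag
-- ===== SOURCE A (Python) =====
-- def countBag(N):
--     if N % 5 == 0:
--         return N//5
--     countThree = 0
--     while N > 0:
--         N -= 3
--         countThree += 1
--         if N % 5 == 0 :
--             return countThree + N//5
--     return countThree if N == 0 else -1
-- ===== SOURCE B (Python) =====
-- def countBag(N):
--     if N % 5 == 0:
--         return N // 5
--     a = (2 * N) % 5  # 2 is the inverse of 3 mod 5, so 3*a ≡ N (mod 5)
--     if 3 * a <= N:
--         return a + (N - 3 * a) // 5
--     return -1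
-- ===== Notes on version B (the rewrite author's own statement) =====
-- stated objective: simpler
-- what changed: Replaces A's subtract-and-test loop with a closed modular formula for the required count of three-bags (using the modular inverse of the bag size), then a single feasibility check.
import Mathlib
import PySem

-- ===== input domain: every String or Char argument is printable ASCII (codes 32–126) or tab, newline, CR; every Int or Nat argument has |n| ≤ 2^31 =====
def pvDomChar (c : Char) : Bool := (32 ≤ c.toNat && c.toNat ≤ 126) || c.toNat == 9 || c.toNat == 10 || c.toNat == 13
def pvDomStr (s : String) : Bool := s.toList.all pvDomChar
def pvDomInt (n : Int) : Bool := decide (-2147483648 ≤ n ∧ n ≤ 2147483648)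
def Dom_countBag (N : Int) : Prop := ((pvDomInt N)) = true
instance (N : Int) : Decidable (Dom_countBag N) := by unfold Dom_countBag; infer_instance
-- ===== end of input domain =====

-- B replaces A's subtract-and-test loop by the closed modular form a = (2*N) % 5; objective: simpler.

-- ===== PORT A =====
-- the 'while N > 0' loop of A, carrying countThree; terminates since N decreases by 3
def countBagLoop (N : Int) (countThree : Int) : Int :=
  if _h : N > 0 then
    let N' := N - 3
    let countThree' := countThree + 1
    if PySem.Int.mod N' 5 = 0 then countThree' + PySem.Int.floordiv N' 5
    else countBagLoop N' countThree'
  else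
    if N = 0 then countThree else -1
termination_by N.toNat
decreasing_by omega

def countBag (N : Int) : Int :=
  if PySem.Int.mod N 5 = 0 then PySem.Int.floordiv N 5
  else countBagLoop N 0

-- ===== PORT B =====
def countBag_alt (N : Int) : Int :=
  if PySem.Int.mod N 5 = 0 then PySem.Int.floordiv N 5
  else
    let a := PySem.Int.mod (2 * N) 5
    if 3 * a ≤ N then a + PySem.Int.floordiv (N - 3 * a) 5
    else -1

-- ===== PRECONDITION & SPEC =====
def Spec_countBag (N : Int) (out : Int) : Prop := out = countBag_alt N
instance (N : Int) (out : Int) : Decidable (Spec_countBag N out) := by unfold Spec_countBag; infer_instance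

-- ===== CLAIM (what is proved, stated in full; the proofs are below) =====
def Claim_equal_countBag : Prop := ∀ (N : Int), Dom_countBag N → Spec_countBag N (countBag N)

-- ===== LEMMAS AND PROOFS =====

-- loop characterisation: for N not a multiple of 5 the loop computes B's closed form shifted by the accumulator
theorem countBagLoop_eq (N c : Int) (h5 : PySem.Int.mod N 5 ≠ 0) :
    countBagLoop N c =
      (if 3 * PySem.Int.mod (2 * N) 5 ≤ N
       then c + PySem.Int.mod (2 * N) 5 + PySem.Int.floordiv (N - 3 * PySem.Int.mod (2 * N) 5) 5
       else -1) := by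
  rw [PySem.Int.mod_eq_emod_of_pos (by norm_num)] at h5
  suffices h : ∀ (k : Nat) (N c : Int), N.toNat ≤ k → N % 5 ≠ 0 →
      countBagLoop N c =
        (if 3 * PySem.Int.mod (2 * N) 5 ≤ N
         then c + PySem.Int.mod (2 * N) 5 + PySem.Int.floordiv (N - 3 * PySem.Int.mod (2 * N) 5) 5
         else -1) from h N.toNat N c le_rfl h5
  intro k
  induction k with
  | zero =>
    intro N c hk h5
    rw [countBagLoop]
    rw [PySem.Int.mod_eq_emod_of_pos (a := 2 * N) (by norm_num),
        PySem.Int.floordiv_eq_ediv_of_pos (by norm_num)]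
    have hpos : ¬ N > 0 := by omega
    simp only [hpos, dif_neg, not_false_iff]
    have hne : N ≠ 0 := by intro h; rw [h] at h5; simp at h5
    rw [if_neg hne]
    have : ¬ (3 * ((2 * N) % 5) ≤ N) := by
      have h1 : 1 ≤ (2 * N) % 5 := by omega
      omega
    rw [if_neg this]
  | succ k ih0 =>
    intro N c hk h5
    have ih : ∀ (N' c' : Int), N'.toNat ≤ k → N' % 5 ≠ 0 →
        countBagLoop N' c' =
          (if 3 * PySem.Int.mod (2 * N') 5 ≤ N'
           then c' + PySem.Int.mod (2 * N') 5 + PySem.Int.floordiv (N' - 3 * PySem.Int.mod (2 * N') 5) 5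
           else -1) := ih0
    rw [countBagLoop]
    rw [PySem.Int.mod_eq_emod_of_pos (a := 2 * N) (by norm_num),
        PySem.Int.floordiv_eq_ediv_of_pos (by norm_num)]
    by_cases hpos : N > 0
    · simp only [hpos, dif_pos]
      by_cases hmod : PySem.Int.mod (N - 3) 5 = 0
      · rw [if_pos hmod]
        rw [PySem.Int.mod_eq_emod_of_pos (by norm_num)] at hmod
        rw [PySem.Int.floordiv_eq_ediv_of_pos (by norm_num)]
        have ha : (2 * N) % 5 = 1 := by omega
        rw [ha]
        have h3 : 3 * (1 : Int) ≤ N := by omega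
        rw [if_pos h3]
        omega
      · rw [if_neg hmod]
        rw [ih (N - 3) (c + 1) (by omega)
              (by rw [PySem.Int.mod_eq_emod_of_pos (by norm_num)] at hmod
                  exact hmod)]
        rw [PySem.Int.mod_eq_emod_of_pos (a := 2 * (N - 3)) (by norm_num),
            PySem.Int.floordiv_eq_ediv_of_pos (by norm_num)]
        rw [PySem.Int.mod_eq_emod_of_pos (by norm_num)] at hmod
        -- a = (2N)%5 ∈ {2,3,4} here (a = 1 would make N-3 a multiple of 5); a' = a - 1
        have hr : N % 5 = 1 ∨ N % 5 = 2 ∨ N % 5 = 4 := by omega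
        have ha' : (2 * (N - 3)) % 5 = (2 * N) % 5 - 1 := by
          rcases hr with h | h | h <;> omega
        rw [ha']
        have hiff : (3 * ((2 * N) % 5 - 1) ≤ N - 3) ↔ (3 * ((2 * N) % 5) ≤ N) := by omega
        by_cases hle : 3 * ((2 * N) % 5) ≤ N
        · rw [if_pos (hiff.mpr hle), if_pos hle]
          have : N - 3 - 3 * ((2 * N) % 5 - 1) = N - 3 * ((2 * N) % 5) := by ring
          rw [this]; ring
        · rw [if_neg (fun hc => hle (hiff.mp hc)), if_neg hle]
    · simp only [hpos, dif_neg, not_false_iff]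
      have hne : N ≠ 0 := by intro h; rw [h] at h5; simp at h5
      rw [if_neg hne]
      have : ¬ (3 * ((2 * N) % 5) ≤ N) := by
        have h1 : 1 ≤ (2 * N) % 5 := by omega
        omega
      rw [if_neg this]

-- ===== VERDICT (by name: the statement is the Claim_ definition above) =====
theorem countBag_spec : Claim_equal_countBag := by
  intro N _
  unfold Spec_countBag countBag countBag_alt
  by_cases h5 : PySem.Int.mod N 5 = 0
  · rw [if_pos h5, if_pos h5]
  · rw [if_neg h5, if_neg h5]
    rw [countBagLoop_eq N 0 h5]
    simp only []
    by_cases hle : 3 * PySem.Int.mod (2 * N) 5 ≤ N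
    · rw [if_pos hle, if_pos hle]; ring
    · rw [if_neg hle, if_neg hle]
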